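-- pv_equiv track=rewrite | github.com/RookMG/PythonCodes | Programmers/386131_381.py | solution
-- ===== SOURCE A (Python) =====
-- def solution(land, P, Q):
--     left = min(min(_) for _ in land)
--     right = max(max(_) for _ in land)
--     answer = (right-left)*len(land)*len(land[0])*max(P,Q)
--     for _ in range(right-left):
--         temp = 0
--         for i in land:
--             for j in i:
--                 temp += P*(_+left-j) if j<_+left else Q*(j-_-left)
--         answer = min(answer,temp)
--     return answer
-- ===== SOURCE B (Python) =====
-- def solution(land, P, Q):
--     # One pass to build a value counter, then an O(1)-per-level incremental
--     # sweep of the convex cost function instead of re-summing the whole grid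
--     # at every candidate height.
--     vals = [v for row in land for v in row]
--     lo = min(vals)
--     hi = max(vals)
--     n = len(vals)
--     cnt = {}
--     for v in vals:
--         cnt[v] = cnt.get(v, 0) + 1
--     best = (hi - lo) * len(land) * len(land[0]) * max(P, Q)
--     cost = Q * (sum(vals) - lo * n)  # cost of leveling at height lo
--     c_le = 0
--     for h in range(lo, hi):
--         if cost < best:
--             best = cost
--         c_le += cnt.get(h, 0)
--         cost += P * c_le - Q * (n - c_le)
--     return best
-- ===== Notes on version B (the rewrite author's own statement) =====
-- stated objective: faster
-- what changed: Replaces the rescan of the whole grid at every candidate height by a single flatten+counter pass and an incremental sweep that updates the convex cost in O(1) per height via the running count of cells at or below it.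
import Mathlib
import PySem

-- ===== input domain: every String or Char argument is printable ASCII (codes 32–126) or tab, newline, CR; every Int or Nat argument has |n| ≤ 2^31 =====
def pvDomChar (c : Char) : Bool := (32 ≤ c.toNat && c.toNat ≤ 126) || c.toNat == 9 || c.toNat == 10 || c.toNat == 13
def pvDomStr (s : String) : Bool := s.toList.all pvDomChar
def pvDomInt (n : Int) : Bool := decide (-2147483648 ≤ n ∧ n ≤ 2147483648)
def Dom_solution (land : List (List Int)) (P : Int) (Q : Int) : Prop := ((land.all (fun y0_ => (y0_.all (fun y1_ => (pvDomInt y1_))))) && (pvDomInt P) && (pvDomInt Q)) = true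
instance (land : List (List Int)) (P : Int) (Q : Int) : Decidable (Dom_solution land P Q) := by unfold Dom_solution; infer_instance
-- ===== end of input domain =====

-- B replaces A's full-grid rescan per candidate height by a flatten+counter pass and an
-- incremental per-height update of the cost (objective: faster); same return value on Pre_.

-- ===== PORT A =====
def solution (land : List (List Int)) (P : Int) (Q : Int) : Int :=
  let left := (PySem.List.min? (land.map (fun r => (PySem.List.min? r (fun x => x)).getD 0)) (fun x => x)).getD 0
  let right := (PySem.List.max? (land.map (fun r => (PySem.List.max? r (fun x => x)).getD 0)) (fun x => x)).getD 0
  let answer := (right - left) * (land.length : Int) * (((PySem.List.pyGet? land 0).getD []).length : Int) * (max P Q)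
  (PySem.List.pyRange 0 (right - left) 1).foldl
    (fun answer u =>
      let temp := land.foldl (fun t i =>
        i.foldl (fun t j => t + (if j < u + left then P * (u + left - j) else Q * (j - u - left))) t) 0
      min answer temp) answer

-- ===== PORT B =====
def solution_alt (land : List (List Int)) (P : Int) (Q : Int) : Int :=
  let vals := land.flatMap (fun row => row)
  let lo := (PySem.List.min? vals (fun x => x)).getD 0
  let hi := (PySem.List.max? vals (fun x => x)).getD 0
  let n : Int := vals.length
  let cnt := vals.foldl (fun (d : PySem.Dict Int Int) v => d.insert v (d.getD v 0 + 1)) PySem.Dict.empty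
  let best := (hi - lo) * (land.length : Int) * (((PySem.List.pyGet? land 0).getD []).length : Int) * (max P Q)
  let s := (PySem.List.pyRange lo hi 1).foldl
    (fun (s : Int × Int × Int) h =>
      let best := min s.1 s.2.1
      let cle := s.2.2 + cnt.getD h 0
      let cost := s.2.1 + P * cle - Q * (n - cle)
      (best, cost, cle))
    (best, Q * (vals.sum - lo * n), 0)
  s.1

-- ===== PRECONDITION & SPEC =====
-- A raises ValueError (min/max of an empty sequence) when land is empty or some row is empty.
def Pre_solution (land : List (List Int)) (P : Int) (Q : Int) : Prop :=
  land ≠ [] ∧ ∀ r ∈ land, r ≠ []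
instance (land : List (List Int)) (P : Int) (Q : Int) : Decidable (Pre_solution land P Q) := by
  unfold Pre_solution; infer_instance
def pvWitness_solution : List (List Int) × Int × Int := ([[1, 2], [3, 0]], 2, 3)

def Spec_solution (land : List (List Int)) (P : Int) (Q : Int) (out : Int) : Prop := out = solution_alt land P Q
instance (land : List (List Int)) (P : Int) (Q : Int) (out : Int) : Decidable (Spec_solution land P Q out) := by unfold Spec_solution; infer_instance

-- ===== CLAIM (what is proved, stated in full; the proofs are below) =====
def Claim_equal_solution : Prop := ∀ (land : List (List Int)) (P : Int) (Q : Int), Dom_solution land P Q → Pre_solution land P Q → Spec_solution land P Q (solution land P Q)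

-- ===== LEMMAS AND PROOFS =====

-- cost of leveling every cell of vals to height h, as A sums it per cell
def costF (vals : List Int) (P Q h : Int) : Int :=
  (vals.map (fun j => if j < h then P * (h - j) else Q * (j - h))).sum

-- running minimum of costF over the heights h0, h0+1, …, h0+k-1, started at best
def foldMin (vals : List Int) (P Q : Int) (best h0 : Int) : Nat → Int
  | 0 => best
  | k + 1 => foldMin vals P Q (min best (costF vals P Q h0)) (h0 + 1) k

-- one step of B's sweep, with the dict lookup already rewritten to a count
def bStep (vals : List Int) (P Q : Int) (s : Int × Int × Int) (h : Int) : Int × Int × Int :=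
  (min s.1 s.2.1,
   s.2.1 + P * (s.2.2 + (List.count h vals : Int)) - Q * ((vals.length : Int) - (s.2.2 + (List.count h vals : Int))),
   s.2.2 + (List.count h vals : Int))

lemma count_toInt (vals : List Int) (h : Int) :
    (vals.countP (fun j => decide (j ≤ h)) : Int)
      = (vals.countP (fun j => decide (j < h)) : Int) + (List.count h vals : Int) := by
  induction vals with
  | nil => simp
  | cons j t ih =>
    simp only [List.countP_cons, List.count_cons]
    by_cases h1 : j ≤ h <;> by_cases h2 : j < h <;> by_cases h3 : j = h <;>
      simp [h1, h2, h3] <;> omega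

lemma countP_lt_succ (vals : List Int) (h : Int) :
    vals.countP (fun j => decide (j < h + 1)) = vals.countP (fun j => decide (j ≤ h)) := by
  apply List.countP_congr
  intro x _
  have : (x < h + 1) ↔ (x ≤ h) := by omega
  simp [this]

lemma cost_step (vals : List Int) (P Q h : Int) :
    costF vals P Q (h + 1)
      = costF vals P Q h + P * (vals.countP (fun j => decide (j ≤ h)) : Int)
          - Q * ((vals.length : Int) - (vals.countP (fun j => decide (j ≤ h)) : Int)) := by
  induction vals with
  | nil => simp [costF]
  | cons j t ih =>
    simp only [costF, List.map_cons, List.sum_cons, List.countP_cons, List.length_cons] at *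
    rcases lt_trichotomy j h with hc | hc | hc
    · have e1 : j < h + 1 := by omega
      have e2 : j ≤ h := by omega
      simp only [if_pos hc, if_pos e1, e2, decide_true, if_true]
      push_cast
      linarith [ih]
    · subst hc
      have e1 : j < j + 1 := by omega
      have e2 : ¬ j < j := by omega
      have e3 : j ≤ j := le_refl j
      simp only [if_pos e1, if_neg e2, e3, decide_true, if_true]
      push_cast
      linarith [ih]
    · have e1 : ¬ j < h + 1 := by omega
      have e2 : ¬ j < h := by omega
      have e3 : ¬ j ≤ h := by omega
      simp only [if_neg e1, if_neg e2, e3, decide_false]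
      push_cast
      linarith [ih]

lemma cost_lo (vals : List Int) (P Q lo : Int) (hlo : ∀ j ∈ vals, lo ≤ j) :
    costF vals P Q lo = Q * (vals.sum - lo * (vals.length : Int)) := by
  induction vals with
  | nil => simp [costF]
  | cons j t ih =>
    have hj : ¬ j < lo := by have := hlo j (by simp); omega
    have ih' := ih (fun x hx => hlo x (by simp [hx]))
    simp only [costF, List.map_cons, List.sum_cons, List.length_cons] at *
    rw [if_neg hj, ih']
    push_cast
    ring

lemma countP_lo (vals : List Int) (lo : Int) (hlo : ∀ j ∈ vals, lo ≤ j) :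
    vals.countP (fun j => decide (j < lo)) = 0 := by
  rw [List.countP_eq_zero]
  intro x hx
  simpa using not_lt.mpr (hlo x hx)

lemma min_flat_eq (land : List (List Int)) (hne : land ≠ []) (hrows : ∀ r ∈ land, r ≠ []) :
    (PySem.List.min? (land.map (fun r => (PySem.List.min? r (fun x => x)).getD 0)) (fun x => x)).getD 0
      = (PySem.List.min? (land.flatMap (fun r => r)) (fun x => x)).getD 0 := by
  obtain ⟨a, ha⟩ : ∃ a, PySem.List.min? (land.map (fun r => (PySem.List.min? r (fun x => x)).getD 0)) (fun x => x) = some a := by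
    cases hm : PySem.List.min? (land.map (fun r => (PySem.List.min? r (fun x => x)).getD 0)) (fun x => x) with
    | none => exact absurd (by simpa using (PySem.List.min?_eq_none_iff _ _).1 hm) hne
    | some a => exact ⟨a, rfl⟩
  obtain ⟨b, hb⟩ : ∃ b, PySem.List.min? (land.flatMap (fun r => r)) (fun x => x) = some b := by
    cases hm : PySem.List.min? (land.flatMap (fun r => r)) (fun x => x) with
    | none =>
      exfalso
      have h0 := (PySem.List.min?_eq_none_iff _ _).1 hm
      obtain ⟨r, hr⟩ := List.exists_mem_of_ne_nil land hne
      exact hrows r hr (List.flatMap_eq_nil_iff.1 h0 r hr)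
    | some b => exact ⟨b, rfl⟩
  rw [ha, hb]
  simp only [Option.getD_some]
  have hamem := PySem.List.min?_mem ha
  obtain ⟨r0, hr0, har0⟩ := List.mem_map.1 hamem
  obtain ⟨m0, hm0⟩ : ∃ m0, PySem.List.min? r0 (fun x => x) = some m0 := by
    cases hm : PySem.List.min? r0 (fun x => x) with
    | none => exact absurd ((PySem.List.min?_eq_none_iff _ _).1 hm) (hrows r0 hr0)
    | some m0 => exact ⟨m0, rfl⟩
  have haflat : a ∈ land.flatMap (fun r => r) := by
    rw [← har0, hm0]
    exact List.mem_flatMap.2 ⟨r0, hr0, by simpa using PySem.List.min?_mem hm0⟩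
  have hba : b ≤ a := by simpa using PySem.List.min?_isMin hb a haflat
  obtain ⟨r1, hr1, hbr1⟩ := List.mem_flatMap.1 (PySem.List.min?_mem hb)
  obtain ⟨m1, hm1⟩ : ∃ m1, PySem.List.min? r1 (fun x => x) = some m1 := by
    cases hm : PySem.List.min? r1 (fun x => x) with
    | none => exact absurd ((PySem.List.min?_eq_none_iff _ _).1 hm) (hrows r1 hr1)
    | some m1 => exact ⟨m1, rfl⟩
  have ham1 : a ≤ m1 := by
    have : m1 ∈ land.map (fun r => (PySem.List.min? r (fun x => x)).getD 0) :=
      List.mem_map.2 ⟨r1, hr1, by rw [hm1]; rfl⟩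
    simpa using PySem.List.min?_isMin ha m1 this
  have hm1b : m1 ≤ b := by simpa using PySem.List.min?_isMin hm1 b hbr1
  omega

lemma max_flat_eq (land : List (List Int)) (hne : land ≠ []) (hrows : ∀ r ∈ land, r ≠ []) :
    (PySem.List.max? (land.map (fun r => (PySem.List.max? r (fun x => x)).getD 0)) (fun x => x)).getD 0
      = (PySem.List.max? (land.flatMap (fun r => r)) (fun x => x)).getD 0 := by
  obtain ⟨a, ha⟩ : ∃ a, PySem.List.max? (land.map (fun r => (PySem.List.max? r (fun x => x)).getD 0)) (fun x => x) = some a := by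
    cases hm : PySem.List.max? (land.map (fun r => (PySem.List.max? r (fun x => x)).getD 0)) (fun x => x) with
    | none => exact absurd (by simpa using (PySem.List.max?_eq_none_iff _ _).1 hm) hne
    | some a => exact ⟨a, rfl⟩
  obtain ⟨b, hb⟩ : ∃ b, PySem.List.max? (land.flatMap (fun r => r)) (fun x => x) = some b := by
    cases hm : PySem.List.max? (land.flatMap (fun r => r)) (fun x => x) with
    | none =>
      exfalso
      have h0 := (PySem.List.max?_eq_none_iff _ _).1 hm
      obtain ⟨r, hr⟩ := List.exists_mem_of_ne_nil land hne
      exact hrows r hr (List.flatMap_eq_nil_iff.1 h0 r hr)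
    | some b => exact ⟨b, rfl⟩
  rw [ha, hb]
  simp only [Option.getD_some]
  have hamem := PySem.List.max?_mem ha
  obtain ⟨r0, hr0, har0⟩ := List.mem_map.1 hamem
  obtain ⟨m0, hm0⟩ : ∃ m0, PySem.List.max? r0 (fun x => x) = some m0 := by
    cases hm : PySem.List.max? r0 (fun x => x) with
    | none => exact absurd ((PySem.List.max?_eq_none_iff _ _).1 hm) (hrows r0 hr0)
    | some m0 => exact ⟨m0, rfl⟩
  have haflat : a ∈ land.flatMap (fun r => r) := by
    rw [← har0, hm0]
    exact List.mem_flatMap.2 ⟨r0, hr0, by simpa using PySem.List.max?_mem hm0⟩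
  have hba : a ≤ b := by simpa using PySem.List.max?_isMax hb a haflat
  obtain ⟨r1, hr1, hbr1⟩ := List.mem_flatMap.1 (PySem.List.max?_mem hb)
  obtain ⟨m1, hm1⟩ : ∃ m1, PySem.List.max? r1 (fun x => x) = some m1 := by
    cases hm : PySem.List.max? r1 (fun x => x) with
    | none => exact absurd ((PySem.List.max?_eq_none_iff _ _).1 hm) (hrows r1 hr1)
    | some m1 => exact ⟨m1, rfl⟩
  have ham1 : m1 ≤ a := by
    have : m1 ∈ land.map (fun r => (PySem.List.max? r (fun x => x)).getD 0) :=
      List.mem_map.2 ⟨r1, hr1, by rw [hm1]; rfl⟩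
    simpa using PySem.List.max?_isMax ha m1 this
  have hm1b : b ≤ m1 := by simpa using PySem.List.max?_isMax hm1 b hbr1
  omega

lemma sum_map_flatMap (land : List (List Int)) (g : Int → Int) :
    ((land.flatMap (fun r => r)).map g).sum = (land.map (fun i => (i.map g).sum)).sum := by
  induction land with
  | nil => simp
  | cons r t ih =>
    simp only [List.flatMap_cons, List.map_append, List.sum_append, List.map_cons, List.sum_cons, ih]

-- A's inner double loop over the grid is the flat per-cell sum costF
lemma tempA_eq (land : List (List Int)) (P Q u lo : Int) :
    land.foldl (fun t i => i.foldl (fun t j => t + (if j < u + lo then P * (u + lo - j) else Q * (j - u - lo))) t) 0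
      = costF (land.flatMap (fun r => r)) P Q (u + lo) := by
  have h1 : land.foldl (fun t i => i.foldl (fun t j => t + (if j < u + lo then P * (u + lo - j) else Q * (j - u - lo))) t) 0
      = land.foldl (fun t i => t + (i.map (fun j => if j < u + lo then P * (u + lo - j) else Q * (j - u - lo))).sum) 0 := by
    apply PySem.List.foldl_congr_mem
    intro acc x _
    exact PySem.List.foldl_add x _ acc
  rw [h1, PySem.List.foldl_add land (fun i => (i.map (fun j => if j < u + lo then P * (u + lo - j) else Q * (j - u - lo))).sum) 0]
  rw [costF]
  have hg : (fun j => if j < u + lo then P * (u + lo - j) else Q * (j - (u + lo)))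
      = (fun j => if j < u + lo then P * (u + lo - j) else Q * (j - u - lo)) := by
    funext j; split <;> ring
  rw [hg, sum_map_flatMap]
  ring

-- A's minimisation loop is foldMin
lemma rangeA (vals : List Int) (P Q : Int) :
    ∀ (k : Nat) (h0 a : Int),
      (List.range k).foldl (fun (a : Int) (i : Nat) => min a (costF vals P Q (h0 + (i : Int)))) a
        = foldMin vals P Q a h0 k := by
  intro k
  induction k with
  | zero => intro h0 a; simp [foldMin]
  | succ k ih =>
    intro h0 a
    rw [List.range_succ_eq_map, List.foldl_cons, List.foldl_map]
    have hb : ∀ (acc : Int), ∀ i ∈ List.range k,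
        min acc (costF vals P Q (h0 + (Nat.succ i : Int))) = min acc (costF vals P Q ((h0 + 1) + (i : Int))) := by
      intro acc i _
      congr 1
      push_cast
      ring_nf
    rw [PySem.List.foldl_congr_mem _ _ _ _ hb, ih]
    simp [foldMin]

-- B's incremental sweep: the state stays (running min, costF h, #cells ≤ h-1)
lemma rangeB (vals : List Int) (P Q : Int) :
    ∀ (k : Nat) (h0 best : Int),
      (List.range k).foldl (fun (s : Int × Int × Int) (i : Nat) => bStep vals P Q s (h0 + (i : Int)))
          (best, costF vals P Q h0, (vals.countP (fun j => decide (j < h0)) : Int))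
        = (foldMin vals P Q best h0 k, costF vals P Q (h0 + k),
           (vals.countP (fun j => decide (j < h0 + k)) : Int)) := by
  intro k
  induction k with
  | zero => intro h0 best; simp [foldMin]
  | succ k ih =>
    intro h0 best
    rw [List.range_succ_eq_map, List.foldl_cons, List.foldl_map]
    have hstep : bStep vals P Q (best, costF vals P Q h0, (vals.countP (fun j => decide (j < h0)) : Int)) (h0 + ((0 : Nat) : Int))
        = (min best (costF vals P Q h0), costF vals P Q (h0 + 1), (vals.countP (fun j => decide (j < h0 + 1)) : Int)) := by
      simp only [bStep, Nat.cast_zero, add_zero]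
      refine Prod.ext rfl (Prod.ext ?_ ?_)
      · simp only [cost_step, count_toInt]
      · rw [countP_lt_succ, count_toInt]
    rw [hstep]
    have hb : ∀ (acc : Int × Int × Int), ∀ i ∈ List.range k,
        bStep vals P Q acc (h0 + (Nat.succ i : Int)) = bStep vals P Q acc ((h0 + 1) + (i : Int)) := by
      intro acc i _
      congr 1
      push_cast
      ring
    rw [PySem.List.foldl_congr_mem _ _ _ _ hb, ih]
    have h1 : h0 + 1 + (k : Int) = h0 + ((k : Nat) + 1 : Nat) := by push_cast; ring
    rw [foldMin, ← h1]

-- ===== VERDICT (by name: the statement is the Claim_ definition above) =====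
theorem solution_spec : Claim_equal_solution := by
  intro land P Q _ hpre
  obtain ⟨hne, hrows⟩ := hpre
  unfold Spec_solution
  simp only [solution, solution_alt]
  rw [min_flat_eq land hne hrows, max_flat_eq land hne hrows]
  have hvne : land.flatMap (fun r => r) ≠ [] := by
    obtain ⟨r, hr⟩ := List.exists_mem_of_ne_nil land hne
    intro h0
    exact hrows r hr (List.flatMap_eq_nil_iff.1 h0 r hr)
  obtain ⟨lo, hlo⟩ : ∃ lo, PySem.List.min? (land.flatMap (fun r => r)) (fun x => x) = some lo := by
    cases hm : PySem.List.min? (land.flatMap (fun r => r)) (fun x => x) with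
    | none => exact absurd ((PySem.List.min?_eq_none_iff _ _).1 hm) hvne
    | some lo => exact ⟨lo, rfl⟩
  rw [hlo]
  have hlomin : ∀ j ∈ land.flatMap (fun r => r), lo ≤ j := by
    intro j hj
    simpa using PySem.List.min?_isMin hlo j hj
  simp only [Option.getD_some]
  set vals := List.flatMap (fun r => r) land with hvals
  set hi := (PySem.List.max? vals (fun x => x)).getD 0 with hhi
  rw [PySem.List.pyRange_one 0 (hi - lo), PySem.List.pyRange_one lo hi]
  simp only [sub_zero]
  rw [List.foldl_map, List.foldl_map]
  have hA : ∀ (acc : Int), ∀ u ∈ List.range (hi - lo).toNat,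
      min acc (List.foldl (fun t i => List.foldl (fun t j => t + if j < 0 + (u : Int) + lo then P * (0 + (u : Int) + lo - j) else Q * (j - (0 + (u : Int)) - lo)) t i) 0 land)
        = min acc (costF vals P Q (lo + (u : Int))) := by
    intro acc u _
    rw [tempA_eq land P Q (0 + (u : Int)) lo]
    rw [← hvals]
    have he : (0 : Int) + (u : Int) + lo = lo + (u : Int) := by omega
    rw [he]
  rw [PySem.List.foldl_congr_mem _ _ _ _ hA, rangeA vals P Q]
  have hB : ∀ (acc : Int × Int × Int), ∀ u ∈ List.range (hi - lo).toNat,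
      (min acc.1 acc.2.1,
        acc.2.1 + P * (acc.2.2 + (List.foldl (fun (d : PySem.Dict Int Int) v => d.insert v (d.getD v 0 + 1)) PySem.Dict.empty vals).getD (lo + (u : Int)) 0) -
          Q * ((vals.length : Int) - (acc.2.2 + (List.foldl (fun (d : PySem.Dict Int Int) v => d.insert v (d.getD v 0 + 1)) PySem.Dict.empty vals).getD (lo + (u : Int)) 0)),
        acc.2.2 + (List.foldl (fun (d : PySem.Dict Int Int) v => d.insert v (d.getD v 0 + 1)) PySem.Dict.empty vals).getD (lo + (u : Int)) 0)
        = bStep vals P Q acc (lo + (u : Int)) := by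
    intro acc u _
    simp only [bStep, PySem.Dict.getD_foldl_insert_add_one, PySem.Dict.getD_empty, zero_add]
  rw [PySem.List.foldl_congr_mem _ _ _ _ hB]
  have hc0 : ((vals.countP (fun j => decide (j < lo)) : Nat) : Int) = 0 := by
    rw [countP_lo vals lo hlomin]
    rfl
  rw [← cost_lo vals P Q lo hlomin, ← hc0, rangeB vals P Q]
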